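-- pv_equiv track=rewrite | github.com/Pranav-Swarup/GeneSeq | seq_scan/scanner.py | pam_match
-- ===== SOURCE A (Python) =====
-- def pam_match(seq, pam_pattern):
--     """Return True if seq matches PAM pattern with N wildcard support."""
--     if len(seq) != len(pam_pattern):
--         return False
--     for s_char, p_char in zip(seq.upper(), pam_pattern.upper()):
--         if p_char == 'N':
--             continue
--         if s_char != p_char:
--             return False
--     return True
-- ===== SOURCE B (Python) =====
-- def pam_match(seq, pam_pattern):
--     """Return True if seq matches PAM pattern with N wildcard support."""
--     s = seq.upper()
--     p = pam_pattern.upper()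
--     if len(s) != len(p):
--         return False
--     i = 0
--     for seg in p.split('N'):
--         if not s.startswith(seg, i):
--             return False
--         i += len(seg) + 1
--     return True
-- ===== Notes on version B (the rewrite author's own statement) =====
-- stated objective: alternative
-- what changed: B splits the uppercased pattern on 'N' into literal segments and checks each segment with str.startswith at its computed offset, instead of A's per-character loop over zip with a wildcard branch.
import Mathlib
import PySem

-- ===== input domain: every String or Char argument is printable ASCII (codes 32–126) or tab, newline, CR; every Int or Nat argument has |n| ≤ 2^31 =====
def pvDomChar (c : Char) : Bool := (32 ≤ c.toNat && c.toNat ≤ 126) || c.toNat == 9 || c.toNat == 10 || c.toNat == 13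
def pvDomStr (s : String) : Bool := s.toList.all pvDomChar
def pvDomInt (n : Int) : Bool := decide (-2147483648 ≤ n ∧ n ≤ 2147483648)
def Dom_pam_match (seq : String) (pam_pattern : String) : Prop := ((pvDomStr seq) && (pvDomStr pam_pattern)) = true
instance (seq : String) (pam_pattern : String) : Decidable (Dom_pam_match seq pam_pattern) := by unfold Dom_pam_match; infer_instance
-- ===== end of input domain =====

-- B checks the pattern's literal segments (split on 'N') with startswith at their offsets
-- instead of A's per-character wildcard loop; alternative decomposition, same cost.

-- ===== PORT A =====
-- the 'for s_char, p_char in zip(...)' loop with its early return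
def pamLoop : List (Char × Char) → Bool
  | [] => true
  | (sc, pc) :: rest => if pc = 'N' then pamLoop rest else if sc ≠ pc then false else pamLoop rest

def pam_match (seq : String) (pam_pattern : String) : Bool :=
  if PySem.Str.len seq ≠ PySem.Str.len pam_pattern then false
  else pamLoop (List.zip (PySem.Str.upper seq).toList (PySem.Str.upper pam_pattern).toList)

-- ===== PORT B =====
-- s.startswith(seg, i) for a nonnegative start i: hand port (PySem.Chars.startswith has no
-- start argument); exact for 0 ≤ i: Python returns False when i > len(s), else checks s[i:].
def startswithFrom (s seg : List Char) (i : Nat) : Bool :=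
  decide (i ≤ s.length) && seg.isPrefixOf (s.drop i)

-- the 'for seg in p.split('N')' loop with its early return and offset accumulator
def segLoop (s : List Char) : List (List Char) → Nat → Bool
  | [], _ => true
  | seg :: rest, i => if startswithFrom s seg i then segLoop s rest (i + seg.length + 1) else false

def pam_match_alt (seq : String) (pam_pattern : String) : Bool :=
  let s := PySem.Chars.upper seq.toList
  let p := PySem.Chars.upper pam_pattern.toList
  if s.length ≠ p.length then false
  else segLoop s (PySem.Chars.splitOn p ['N']) 0

-- ===== PRECONDITION & SPEC =====
def Spec_pam_match (seq : String) (pam_pattern : String) (out : Bool) : Prop := out = pam_match_alt seq pam_pattern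
instance (seq : String) (pam_pattern : String) (out : Bool) : Decidable (Spec_pam_match seq pam_pattern out) := by unfold Spec_pam_match; infer_instance

-- ===== CLAIM (what is proved, stated in full; the proofs are below) =====
def Claim_equal_pam_match : Prop := ∀ (seq : String) (pam_pattern : String), Dom_pam_match seq pam_pattern → Spec_pam_match seq pam_pattern (pam_match seq pam_pattern)

-- ===== LEMMAS AND PROOFS =====

-- clean recursive specification of str.split('N')
def mySplit (pre : List Char) : List Char → List (List Char)
  | [] => [pre]
  | c :: rest => if c = 'N' then pre :: mySplit [] rest else mySplit (pre ++ [c]) rest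

-- re-joining the segments with 'N'
def joinN : List (List Char) → List Char
  | [] => []
  | [seg] => seg
  | seg :: s2 :: rest => seg ++ 'N' :: joinN (s2 :: rest)

theorem splitOn_go_spec (fuel : Nat) : ∀ (l cur : List Char) (acc : List (List Char)),
    l.length < fuel →
    PySem.Chars.splitOn.go ['N'] fuel l cur acc = acc.reverse ++ mySplit cur.reverse l := by
  induction fuel with
  | zero => intro l cur acc h; omega
  | succ fuel ih =>
    intro l cur acc h
    cases l with
    | nil => simp [PySem.Chars.splitOn.go, mySplit]
    | cons c rest =>
      rw [PySem.Chars.splitOn.go.eq_def]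
      simp only [List.isPrefixOf, List.length_cons] at *
      by_cases hc : c = 'N'
      · subst hc
        simp only [beq_self_eq_true, Bool.true_and, if_pos]
        rw [ih _ _ _ (by simp; omega)]
        simp [mySplit]
      · rw [if_neg (by simp; first | exact hc | exact fun h => hc h.symm)]
        rw [ih _ _ _ (by omega)]
        simp [mySplit, hc]

theorem splitOn_eq_mySplit (l : List Char) : PySem.Chars.splitOn l ['N'] = mySplit [] l := by
  unfold PySem.Chars.splitOn
  rw [splitOn_go_spec _ _ _ _ (by omega)]
  simp

theorem mySplit_props (l : List Char) : ∀ (pre : List Char), 'N' ∉ pre →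
    (∀ seg ∈ mySplit pre l, 'N' ∉ seg) ∧ joinN (mySplit pre l) = pre ++ l := by
  induction l with
  | nil => intro pre hpre; simp [mySplit, joinN, hpre]
  | cons c rest ih =>
    intro pre hpre
    by_cases hc : c = 'N'
    · subst hc
      obtain ⟨h1, h2⟩ := ih [] (by simp)
      have hne : ∀ (l pre : List Char), mySplit pre l ≠ [] := by
        intro l
        induction l with
        | nil => intro pre; simp [mySplit]
        | cons c r ihr => intro pre; by_cases h : c = 'N' <;> simp [mySplit, h, ihr]
      have hne := hne rest []
      constructor
      · intro seg hseg
        simp [mySplit] at hseg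
        rcases hseg with h | h
        · subst h; exact hpre
        · exact h1 _ h
      · simp only [mySplit]
        obtain ⟨x, xs, hx⟩ := List.exists_cons_of_ne_nil hne
        rw [hx] at h2 ⊢
        simp [joinN, h2]
    · obtain ⟨h1, h2⟩ := ih (pre ++ [c]) (by simp [hpre]; exact fun h => hc h.symm)
      simp only [mySplit, if_neg hc]
      exact ⟨h1, by simp [h2]⟩

theorem isPrefixOf_eq_decide (b : List Char) : ∀ (a : List Char),
    b.isPrefixOf a = decide (a.take b.length = b) := by
  induction b with
  | nil => intro a; simp [List.isPrefixOf]
  | cons x b' ih =>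
    intro a
    cases a with
    | nil => simp [List.isPrefixOf]
    | cons y a' =>
      simp only [List.isPrefixOf, List.length_cons, List.take_succ_cons, ih a']
      by_cases hxy : x = y
      · subst hxy; simp
      · have h1 : (x == y) = false := beq_eq_false_iff_ne.mpr hxy
        have h2 : ¬ (y :: List.take b'.length a' = x :: b') := by
          simp only [List.cons.injEq, not_and]
          intro h _; exact hxy h.symm
        rw [h1]; simp [h2]

theorem pamLoop_eq_decide (p : List Char) : ∀ (s : List Char), 'N' ∉ p → s.length = p.length →
    pamLoop (s.zip p) = decide (s = p) := by
  induction p with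
  | nil => intro s _ hl; rw [List.length_eq_zero_iff.mp hl]; simp [pamLoop]
  | cons pc p' ih =>
    intro s hN hl
    cases s with
    | nil => simp at hl
    | cons sc s' =>
      have hpc : pc ≠ 'N' := fun h => hN (by simp [h])
      simp only [List.zip_cons_cons, pamLoop, if_neg hpc]
      by_cases hsp : sc = pc
      · subst hsp
        rw [if_neg (by simp), ih s' (fun h => hN (by simp [h])) (by simpa using hl)]
        simp
      · simp [hsp]

theorem pamLoop_append (seg : List Char) : ∀ (p' s : List Char), 'N' ∉ seg →
    s.length = seg.length + 1 + p'.length →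
    pamLoop (s.zip (seg ++ 'N' :: p')) =
      (decide (s.take seg.length = seg) && pamLoop ((s.drop (seg.length + 1)).zip p')) := by
  induction seg with
  | nil =>
    intro p' s _ hl
    cases s with
    | nil => simp at hl; omega
    | cons sc s' => simp [pamLoop]
  | cons c seg' ih =>
    intro p' s hN hl
    have hc : c ≠ 'N' := fun h => hN (by simp [h])
    cases s with
    | nil => simp at hl; omega
    | cons sc s' =>
      simp only [List.cons_append, List.zip_cons_cons, pamLoop, if_neg hc]
      by_cases hsc : sc = c
      · subst hsc
        rw [if_neg (by simp)]
        rw [ih p' s' (fun h => hN (by simp [h])) (by simp at hl; omega)]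
        simp [List.take_succ_cons, List.drop_succ_cons]
      · simp [hsc]

theorem segLoop_eq_pamLoop (segs : List (List Char)) : ∀ (s : List Char) (i : Nat),
    (∀ seg ∈ segs, 'N' ∉ seg) → i + (joinN segs).length = s.length →
    segLoop s segs i = pamLoop ((s.drop i).zip (joinN segs)) := by
  induction segs with
  | nil => intro s i _ _; simp [segLoop, joinN, pamLoop]
  | cons seg rest ih =>
    intro s i hN hl
    cases rest with
    | nil =>
      simp only [joinN] at hl ⊢
      have hi : i ≤ s.length := by omega
      have hlen : (s.drop i).length = seg.length := by simp; omega
      rw [segLoop, startswithFrom, isPrefixOf_eq_decide,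
        List.take_of_length_le (by omega),
        pamLoop_eq_decide seg (s.drop i) (hN seg (by simp)) hlen,
        decide_eq_true hi]
      by_cases hp : s.drop i = seg
      · simp [hp, segLoop]
      · simp [hp]
    | cons seg2 rest2 =>
      have hjoin : joinN (seg :: seg2 :: rest2) = seg ++ 'N' :: joinN (seg2 :: rest2) := rfl
      rw [hjoin] at hl ⊢
      have hi : i ≤ s.length := by simp at hl; omega
      have hlen : (s.drop i).length = seg.length + 1 + (joinN (seg2 :: rest2)).length := by
        simp at hl ⊢; omega
      rw [pamLoop_append seg _ _ (hN seg (by simp)) hlen]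
      rw [segLoop, startswithFrom, isPrefixOf_eq_decide, decide_eq_true hi]
      by_cases hpre : (s.drop i).take seg.length = seg
      · rw [if_pos (by simp [hpre])]
        rw [ih s (i + seg.length + 1) (fun g hg => hN g (by simp [hg])) (by simp at hl ⊢; omega)]
        have hdd : seg.length + 1 + i = i + seg.length + 1 := by omega
        simp [hpre, List.drop_drop]
        rw [show i + seg.length + 1 = i + (seg.length + 1) from by omega]
      · rw [if_neg (by simp [hpre])]
        simp [hpre]

-- ===== VERDICT (by name: the statement is the Claim_ definition above) =====
theorem pam_match_spec : Claim_equal_pam_match := by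
  intro seq pat _
  unfold Spec_pam_match pam_match pam_match_alt
  simp only [PySem.Str.len, PySem.Str.upper, PySem.Chars.upper, String.toList_ofList,
    List.length_map, ne_eq, Nat.cast_inj]
  by_cases hl : seq.toList.length = pat.toList.length
  · rw [if_neg (by simpa using hl), if_neg (by simp [hl])]
    set s := seq.toList.map PySem.Chars.upperChar with hs
    set p := pat.toList.map PySem.Chars.upperChar with hp
    obtain ⟨hfree, hjoin⟩ := mySplit_props p [] (by simp)
    rw [splitOn_eq_mySplit, segLoop_eq_pamLoop _ s 0 hfree
      (by rw [Nat.zero_add, hjoin]; simp [hs, hp, hl])]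
    rw [hjoin]; simp
  · rw [if_pos (by simpa using hl), if_pos (by simpa using hl)]
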